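-- pv_equiv track=rewrite | github.com/Ummara-khan/New-Sanc-System | banking-system-master/transactions/name_variations.py | doubling_consonants
-- ===== SOURCE A (Python) =====
-- def doubling_consonants(name):
--     consonants = "BCDFGHJKLMNPQRSTVWXYZ"
--
--     for consonant in consonants:
--         if consonant in name:
--             variation = name.replace(consonant, consonant * 2)
--             if variation != name:
--                 return variation
--     return name
-- ===== SOURCE B (Python) =====
-- def doubling_consonants(name):
--     found = set(name) & set("BCDFGHJKLMNPQRSTVWXYZ")
--     if not found:
--         return name
--     c = min(found)
--     return name.replace(c, c * 2)
-- ===== Notes on version B (the rewrite author's own statement) =====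
-- stated objective: simpler
-- what changed: Replaces the ordered scan over the 21-consonant alphabet (with a membership test and a redundant variation!=name re-check per consonant) by one set intersection of the name with the consonant set followed by min(), which yields the same consonant because the alphabet is ASCII-ascending.
import Mathlib
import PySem

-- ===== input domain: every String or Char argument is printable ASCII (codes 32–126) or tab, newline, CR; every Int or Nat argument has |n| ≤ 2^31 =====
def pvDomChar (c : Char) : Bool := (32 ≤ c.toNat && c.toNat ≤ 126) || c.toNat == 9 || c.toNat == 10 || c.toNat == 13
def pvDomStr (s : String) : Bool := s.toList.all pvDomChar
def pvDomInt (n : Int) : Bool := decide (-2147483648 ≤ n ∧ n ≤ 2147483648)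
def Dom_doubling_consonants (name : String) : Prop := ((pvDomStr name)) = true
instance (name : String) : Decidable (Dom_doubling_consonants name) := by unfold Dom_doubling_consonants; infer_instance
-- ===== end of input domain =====

-- B replaces A's ordered scan of the consonant alphabet by a set intersection plus min();
-- objective: simpler (same asymptotic cost). Return-value equivalence; neither mutates anything.

-- ===== PORT A =====
-- A's loop over the consonant string, with its early return and its variation != name re-check
def dcLoop (name : String) : List Char → String
  | [] => name
  | c :: rest =>
      if PySem.Str.isIn (String.ofList [c]) name then
        let variation := PySem.Str.replace name (String.ofList [c]) (String.ofList [c, c])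
        if variation ≠ name then variation else dcLoop name rest
      else dcLoop name rest

def doubling_consonants (name : String) : String :=
  dcLoop name "BCDFGHJKLMNPQRSTVWXYZ".toList

-- ===== PORT B =====
def doubling_consonants_alt (name : String) : String :=
  let found := PySem.Set.inter (PySem.Set.ofList name.toList)
    (PySem.Set.ofList "BCDFGHJKLMNPQRSTVWXYZ".toList)
  match PySem.List.min? found (fun c => c) with
  | none => name
  | some c => PySem.Str.replace name (String.ofList [c]) (String.ofList [c, c])

-- ===== PRECONDITION & SPEC =====
def Spec_doubling_consonants (name : String) (out : String) : Prop := out = doubling_consonants_alt name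
instance (name : String) (out : String) : Decidable (Spec_doubling_consonants name out) := by unfold Spec_doubling_consonants; infer_instance

-- ===== CLAIM (what is proved, stated in full; the proofs are below) =====
def Claim_equal_doubling_consonants : Prop := ∀ (name : String), Dom_doubling_consonants name → Spec_doubling_consonants name (doubling_consonants name)

-- ===== LEMMAS AND PROOFS =====

-- length of the single-char-to-double-char replace: |s| + (count of the char)
theorem dc_go_length (c : Char) : ∀ (fuel : Nat) (l acc : List Char), l.length ≤ fuel →
    (PySem.Chars.replace.go [c] [c, c] fuel l acc).length = acc.length + l.length + l.count c := by
  intro fuel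
  induction fuel with
  | zero =>
      intro l acc h
      have hl : l = [] := List.eq_nil_of_length_eq_zero (Nat.le_zero.1 h)
      subst hl
      simp [PySem.Chars.replace.go]
  | succ n ih =>
      intro l acc h
      cases l with
      | nil => simp [PySem.Chars.replace.go]
      | cons c' t =>
        rw [PySem.Chars.replace.go]
        by_cases hcc : c = c'
        · subst hcc
          have hpre : [c].isPrefixOf (c :: t) = true := by simp [List.isPrefixOf]
          rw [if_pos hpre]
          have := ih (List.drop 1 (c :: t)) ([c, c].reverse ++ acc)
            (by simpa using Nat.lt_succ_iff.mp (by simpa using h))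
          simp only [List.drop_succ_cons, List.drop_zero] at this
          rw [show List.drop [c].length (c :: t) = t by simp]
          rw [this]
          simp
          omega
        · have hpre : [c].isPrefixOf (c' :: t) = false := by
            simp [List.isPrefixOf]
            exact fun h' => hcc h'
          rw [if_neg (by simp [hpre])]
          have := ih t (c' :: acc) (by simpa using Nat.lt_succ_iff.mp (by simpa using h))
          rw [this]
          simp [Ne.symm hcc]
          omega

theorem dc_replace_ne (name : String) (c : Char) (hc : c ∈ name.toList) :
    PySem.Str.replace name (String.ofList [c]) (String.ofList [c, c]) ≠ name := by
  intro h
  have h2 := congrArg String.toList h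
  rw [PySem.Str.toList_replace] at h2
  simp only [String.toList_ofList] at h2
  have h3 : PySem.Chars.replace name.toList [c] [c, c] = name.toList := h2
  have hlen := congrArg List.length h3
  rw [PySem.Chars.replace] at hlen
  simp only [List.isEmpty_cons] at hlen
  rw [if_neg (by simp)] at hlen
  rw [dc_go_length c _ _ _ (Nat.le_refl _)] at hlen
  have hcount : 0 < name.toList.count c := List.count_pos_iff.2 hc
  simp at hlen
  omega

theorem dc_loop_min (name : String) : ∀ cs : List Char, List.Pairwise (· < ·) cs →
    dcLoop name cs =
      (match PySem.List.min?
          (PySem.Set.inter (PySem.Set.ofList name.toList) (PySem.Set.ofList cs))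
          (fun c => c) with
        | none => name
        | some c => PySem.Str.replace name (String.ofList [c]) (String.ofList [c, c])) := by
  intro cs
  induction cs with
  | nil =>
      intro _
      simp [dcLoop, PySem.Set.inter, PySem.Set.ofList, PySem.List.min?]
  | cons c rest ih =>
      intro hp
      have hlt : ∀ x ∈ rest, c < x := (List.pairwise_cons.1 hp).1
      have hrest := (List.pairwise_cons.1 hp).2
      by_cases hc : c ∈ name.toList
      · -- A returns right away; the minimum of the intersection is c
        have hin : PySem.Str.isIn (String.ofList [c]) name = true := by
          rw [PySem.Str.isIn_iff_infix, String.toList_ofList]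
          exact (List.singleton_infix_iff c name.toList).2 hc
        have hne := dc_replace_ne name c hc
        have hcS : c ∈ PySem.Set.inter (PySem.Set.ofList name.toList)
            (PySem.Set.ofList (c :: rest)) :=
          (PySem.Set.mem_inter _ _ _).2
            ⟨(PySem.Set.mem_ofList _ _).2 hc,
             (PySem.Set.mem_ofList _ _).2 (List.mem_cons_self)⟩
        have hmin : ∀ x ∈ PySem.Set.inter (PySem.Set.ofList name.toList)
            (PySem.Set.ofList (c :: rest)), c ≤ x := by
          intro x hx
          have hx2 : x ∈ c :: rest :=
            (PySem.Set.mem_ofList _ _).1 ((PySem.Set.mem_inter _ _ _).1 hx).2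
          rcases List.mem_cons.1 hx2 with h | h
          · exact le_of_eq h.symm
          · exact le_of_lt (hlt x h)
        have hsome : PySem.List.min?
            (PySem.Set.inter (PySem.Set.ofList name.toList) (PySem.Set.ofList (c :: rest)))
            (fun c => c) = some c := by
          rcases hmn : PySem.List.min?
              (PySem.Set.inter (PySem.Set.ofList name.toList) (PySem.Set.ofList (c :: rest)))
              (fun c => c) with _ | m
          · rw [(PySem.List.min?_eq_none_iff _ _).1 hmn] at hcS
            simp at hcS
          · have hm1 := PySem.List.min?_mem hmn
            have hm2 := PySem.List.min?_id_le hmn c hcS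
            have : m = c := le_antisymm hm2 (hmin m hm1)
            rw [this]
        rw [hsome]
        simp only [dcLoop, hin, if_pos]
        rw [if_pos hne]
      · -- c not in name: A skips it and the intersection is unchanged
        have hin : PySem.Str.isIn (String.ofList [c]) name = false := by
          rw [Bool.eq_false_iff]
          intro h
          have h' := (PySem.Str.isIn_iff_infix _ _).1 h
          rw [String.toList_ofList] at h'
          exact hc ((List.singleton_infix_iff c name.toList).1 h')
        have hS : PySem.Set.inter (PySem.Set.ofList name.toList) (PySem.Set.ofList (c :: rest))
            = PySem.Set.inter (PySem.Set.ofList name.toList) (PySem.Set.ofList rest) := by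
          apply List.filter_congr
          intro x hx
          have hxname : x ∈ name.toList := (PySem.Set.mem_ofList _ _).1 hx
          have hxc : x ≠ c := fun h => hc (h ▸ hxname)
          rw [Bool.eq_iff_iff]
          constructor
          · intro h
            have := (PySem.Set.contains_iff _ _).1 h
            have := (PySem.Set.mem_ofList _ _).1 this
            exact (PySem.Set.contains_iff _ _).2
              ((PySem.Set.mem_ofList _ _).2 ((List.mem_cons.1 this).resolve_left hxc))
          · intro h
            have := (PySem.Set.mem_ofList _ _).1 ((PySem.Set.contains_iff _ _).1 h)
            exact (PySem.Set.contains_iff _ _).2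
              ((PySem.Set.mem_ofList _ _).2 (List.mem_cons_of_mem _ this))
        rw [hS] at *
        simp only [dcLoop, hin, Bool.false_eq_true, if_false]
        exact ih hrest

-- ===== VERDICT (by name: the statement is the Claim_ definition above) =====
theorem doubling_consonants_spec : Claim_equal_doubling_consonants := by
  unfold Claim_equal_doubling_consonants
  intro name _
  unfold Spec_doubling_consonants doubling_consonants doubling_consonants_alt
  exact dc_loop_min name _ (by decide)
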